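-- pv_equiv track=rewrite | github.com/YuanzhongLi/test_creative_information_program | jupyter_notebook/2011-02/q6.py | has2
-- ===== SOURCE A (Python) =====
-- def get_revmark(mark):
--     if mark == 'O':
--         return 'X'
--     elif mark == 'X':
--         return 'O'
--     else:
--         return '-'
--
-- def has2(text, mark):
--     tmp = 0
--     revm = get_revmark(mark)
--     for m in text:
--         if m == revm:
--             return False
--         elif m == mark:
--             tmp += 1
--     return tmp >= 2
-- ===== SOURCE B (Python) =====
-- def get_revmark(mark):
--     if mark == 'O':
--         return 'X'
--     elif mark == 'X':
--         return 'O'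
--     else:
--         return '-'
--
-- def has2(text, mark):
--     revm = get_revmark(mark)
--     if any(c == revm for c in text):
--         return False
--     return sum(1 for c in text if c == mark) >= 2
-- ===== Notes on version B (the rewrite author's own statement) =====
-- stated objective: simpler
-- what changed: Replaced the fused early-exit counting loop by a declarative formulation: one membership scan for the opposite mark followed by one count scan for the mark, with no manual counter or early return inside a loop.
import Mathlib
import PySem

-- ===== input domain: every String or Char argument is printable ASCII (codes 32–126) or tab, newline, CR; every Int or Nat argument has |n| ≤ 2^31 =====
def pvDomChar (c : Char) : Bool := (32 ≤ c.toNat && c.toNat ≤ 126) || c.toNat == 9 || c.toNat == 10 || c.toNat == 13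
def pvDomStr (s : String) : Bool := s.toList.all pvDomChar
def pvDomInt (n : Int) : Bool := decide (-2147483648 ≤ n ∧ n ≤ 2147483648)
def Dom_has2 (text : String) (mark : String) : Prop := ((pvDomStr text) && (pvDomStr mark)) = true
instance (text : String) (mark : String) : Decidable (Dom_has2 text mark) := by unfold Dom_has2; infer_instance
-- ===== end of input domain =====

-- B replaces A's fused early-exit counting loop by two library scans (membership, then count); objective: simpler.


-- ===== PORT A =====
-- helper get_revmark (shared by both Pythons verbatim)
def getRevmark (mark : String) : String :=
  if mark == "O" then "X"
  else if mark == "X" then "O"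
  else "-"

-- A's for-loop with counter tmp and early returns, as structural recursion over the chars
def has2Loop (revm mark : String) (tmp : Nat) : List Char → Bool
  | [] => decide (2 ≤ tmp)
  | c :: cs =>
      if String.singleton c == revm then false
      else if String.singleton c == mark then has2Loop revm mark (tmp + 1) cs
      else has2Loop revm mark tmp cs

def has2 (text : String) (mark : String) : Bool :=
  has2Loop (getRevmark mark) mark 0 text.toList

-- ===== PORT B =====
def has2_alt (text : String) (mark : String) : Bool :=
  let revm := getRevmark mark
  if text.toList.any (fun c => String.singleton c == revm) then false
  else decide (2 ≤ text.toList.countP (fun c => String.singleton c == mark))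

-- ===== PRECONDITION & SPEC =====
def Spec_has2 (text : String) (mark : String) (out : Bool) : Prop := out = has2_alt text mark
instance (text : String) (mark : String) (out : Bool) : Decidable (Spec_has2 text mark out) := by unfold Spec_has2; infer_instance

-- ===== CLAIM (what is proved, stated in full; the proofs are below) =====
def Claim_equal_has2 : Prop := ∀ (text : String) (mark : String), Dom_has2 text mark → Spec_has2 text mark (has2 text mark)

-- ===== LEMMAS AND PROOFS =====
theorem has2Loop_eq (revm mark : String) (cs : List Char) (tmp : Nat) :
    has2Loop revm mark tmp cs =
      if cs.any (fun c => String.singleton c == revm) then false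
      else decide (2 ≤ tmp + cs.countP (fun c => String.singleton c == mark)) := by
  induction cs generalizing tmp with
  | nil => simp [has2Loop]
  | cons c cs ih =>
    by_cases hr : String.singleton c == revm
    · simp [has2Loop, hr]
    · by_cases hm : String.singleton c == mark
      · have h1 : tmp + 1 + List.countP (fun c => String.singleton c == mark) cs
              = tmp + (List.countP (fun c => String.singleton c == mark) cs + 1) := by omega
        simp [has2Loop, hr, hm, ih, h1]
      · simp [has2Loop, hr, hm, ih]

-- ===== VERDICT (by name: the statement is the Claim_ definition above) =====
theorem has2_spec : Claim_equal_has2 := by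
  intro text mark _
  unfold Spec_has2 has2 has2_alt
  rw [has2Loop_eq]
  simp
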